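-- pv_equiv track=rewrite | github.com/olbogdan/Algorithms | Python/AlgoBootcamp/leetcode/medium/1861. Rotating the Box.py | emulateGravitation
-- ===== SOURCE A (Python) =====
-- from typing import List
--
-- def emulateGravitation(box) -> List[List[str]]:
--     STONE = '#'
--     OBST = '*'
--     EMPTY = '.'
--     ROW = len(box)
--     COL = len(box[0])
--     for c in range(COL):
--         bottom = ROW - 1
--         for r in reversed(range(ROW)):
--             if box[r][c] == OBST:
--                 bottom = r - 1
--             elif box[r][c] == STONE:
--                 if r != bottom:
--                     box[bottom][c] = STONE
--                     box[r][c] = EMPTY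
--                 bottom -= 1
--     return box
-- ===== SOURCE B (Python) =====
-- def emulateGravitation(box):
--     rows, cols = len(box), len(box[0])
--     for c in range(cols):
--         col = [box[r][c] for r in range(rows)]
--         # split the column top-to-bottom into obstacle-delimited segments
--         segs = []
--         cur = []
--         for v in col:
--             if v == '*':
--                 segs.append(cur)
--                 cur = []
--             else:
--                 cur.append(v)
--         segs.append(cur)
--         # rebuild the column: per segment, stones compact to the bottom
--         out = []
--         for i, seg in enumerate(segs):
--             if i:
--                 out.append('*')
--             k = seg.count('#')
--             out.extend('.' if x == '#' else x for x in seg[:len(seg) - k])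
--             out.extend(['#'] * k)
--         for r in range(rows):
--             box[r][c] = out[r]
--     return box
-- ===== Notes on version B (the rewrite author's own statement) =====
-- stated objective: alternative
-- what changed: Per column, instead of A's bottom-up pass that moves each stone individually to a running bottom cursor, B splits the column top-down into obstacle-delimited segments, counts the stones per segment, and rebuilds the column by emitting each segment's non-stone top part followed by a block of stones.
import Mathlib
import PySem

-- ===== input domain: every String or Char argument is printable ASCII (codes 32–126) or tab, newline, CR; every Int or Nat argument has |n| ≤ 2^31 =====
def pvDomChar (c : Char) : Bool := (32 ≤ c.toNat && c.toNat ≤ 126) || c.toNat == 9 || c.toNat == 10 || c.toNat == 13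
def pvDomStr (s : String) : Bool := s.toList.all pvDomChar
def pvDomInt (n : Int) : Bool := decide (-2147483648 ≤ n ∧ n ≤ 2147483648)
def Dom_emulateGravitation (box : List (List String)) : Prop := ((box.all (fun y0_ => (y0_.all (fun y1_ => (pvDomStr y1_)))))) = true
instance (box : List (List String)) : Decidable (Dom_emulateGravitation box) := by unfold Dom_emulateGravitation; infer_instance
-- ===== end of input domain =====

-- B rebuilds each column from obstacle-delimited segments with a per-segment stone count, instead of
-- A's bottom-up cursor that moves each stone individually; same cost, different decomposition.
-- Both Pythons mutate `box` in place and return it; both ports model the returned value.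

-- ===== PORT A =====
-- shared cell primitives: box[r][c] read / write (indices are in range on Pre_-admitted inputs,
-- where they are exact for Python's box[r][c])
def pvGet2 (b : List (List String)) (r c : Nat) : String := (b.getD r []).getD c ""
def pvSet2 (b : List (List String)) (r c : Nat) (v : String) : List (List String) :=
  b.set r ((b.getD r []).set c v)

-- one step of A's inner loop (state = (box, bottom)); bottom ≥ r holds at the write, so .toNat is exact
def aStep (c : Nat) (st : List (List String) × Int) (r : Nat) : List (List String) × Int :=
  if pvGet2 st.1 r c = "*" then (st.1, (r : Int) - 1)
  else if pvGet2 st.1 r c = "#" then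
    if (r : Int) ≠ st.2 then (pvSet2 (pvSet2 st.1 st.2.toNat c "#") r c ".", st.2 - 1)
    else (st.1, st.2 - 1)
  else st

def emulateGravitation (box : List (List String)) : List (List String) :=
  let ROW := box.length
  let COL := box.headI.length
  (List.range COL).foldl
    (fun b c => (((List.range ROW).reverse).foldl (aStep c) (b, (ROW : Int) - 1)).1) box

-- ===== PORT B =====
-- emit one segment: its non-stone top part, then its stones as a block
def bSegOut (seg : List String) : List String :=
  let k := seg.count "#"
  (seg.take (seg.length - k)).map (fun x => if x = "#" then "." else x) ++ List.replicate k "#"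

-- split a column (top to bottom) at the obstacles
def bSplit (col : List String) : List (List String) :=
  let st := col.foldl
    (fun (st : List (List String) × List String) v =>
      if v = "*" then (st.1 ++ [st.2], ([] : List String)) else (st.1, st.2 ++ [v])) ([], [])
  st.1 ++ [st.2]

-- rebuild the column from its segments, separated by obstacles
def bBuild (segs : List (List String)) : List String :=
  segs.zipIdx.foldl (fun out si => (if si.2 ≠ 0 then out ++ ["*"] else out) ++ bSegOut si.1) []

def bCol (rows c : Nat) (b : List (List String)) : List (List String) :=
  let col := (List.range rows).map (fun r => pvGet2 b r c)
  let out := bBuild (bSplit col)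
  (List.range rows).foldl (fun b r => pvSet2 b r c (out.getD r "")) b

def emulateGravitation_alt (box : List (List String)) : List (List String) :=
  let rows := box.length
  let cols := box.headI.length
  (List.range cols).foldl (fun b c => bCol rows c b) box

-- ===== PRECONDITION & SPEC =====
-- Pre_ excludes exactly the inputs where Python A raises an IndexError: the empty box
-- (len(box[0])) and boxes with a row shorter than the first row (box[r][c] out of range).
def Pre_emulateGravitation (box : List (List String)) : Prop :=
  box ≠ [] ∧ ∀ row ∈ box, box.headI.length ≤ row.length
instance (box : List (List String)) : Decidable (Pre_emulateGravitation box) := by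
  unfold Pre_emulateGravitation; infer_instance

def pvWitness_emulateGravitation : List (List String) :=
  [["#", "."], [".", "*"], [".", "#"]]

def Spec_emulateGravitation (box : List (List String)) (out : List (List String)) : Prop := out = emulateGravitation_alt box
instance (box : List (List String)) (out : List (List String)) : Decidable (Spec_emulateGravitation box out) := by unfold Spec_emulateGravitation; infer_instance

-- ===== CLAIM (what is proved, stated in full; the proofs are below) =====
def Claim_equal_emulateGravitation : Prop := ∀ (box : List (List String)), Dom_emulateGravitation box → Pre_emulateGravitation box → Spec_emulateGravitation box (emulateGravitation box)

-- ===== LEMMAS AND PROOFS =====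

-- 1D model of one column: the column as a list, A's inner step on it
def step1 (st : List String × Int) (r : Nat) : List String × Int :=
  if st.1.getD r "" = "*" then (st.1, (r : Int) - 1)
  else if st.1.getD r "" = "#" then
    if (r : Int) ≠ st.2 then ((st.1.set st.2.toNat "#").set r ".", st.2 - 1)
    else (st.1, st.2 - 1)
  else st

def colOf (c : Nat) (b : List (List String)) : List String := b.map (fun row => row.getD c "")

def wbC (c : Nat) (col : List String) (b : List (List String)) : List (List String) :=
  List.zipWith (fun row v => row.set c v) b col

def kOf (col : List String) (p t : Nat) : Nat :=
  ((List.range' p t).map (fun i => col.getD i "")).count "#"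

def applySeg (col : List String) (p t g k : Nat) : List String :=
  col.mapIdx (fun i v =>
    if p ≤ i ∧ i < p + t then (if p + t + g ≤ i + k then "#" else if v = "#" then "." else v)
    else if p + t ≤ i ∧ i < p + t + g ∧ p + t + g ≤ i + k then "#" else v)

theorem getD_set' (l : List String) (i j : Nat) (v : String) :
    (l.set i v).getD j "" = if i = j ∧ i < l.length then v else l.getD j "" := by
  simp [List.getD_eq_getElem?_getD, List.getElem?_set]
  split_ifs with h1 h2 h3 h4 <;> simp_all <;> omega

theorem set_getD_self (l : List String) (i : Nat) : l.set i (l.getD i "") = l := by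
  by_cases h : i < l.length
  · rw [List.getD_eq_getElem _ _ h, List.set_getElem_self]
  · rw [List.set_eq_of_length_le (by omega)]

theorem wbC_self (c : Nat) (b : List (List String)) : wbC c (colOf c b) b = b := by
  unfold wbC colOf
  induction b with
  | nil => rfl
  | cons row rest ih =>
    show (row.set c (row.getD c "")) :: List.zipWith (fun row v => row.set c v) rest (rest.map (fun row => row.getD c "")) = row :: rest
    rw [set_getD_self, ih]

theorem pvGet2_wbC (c : Nat) (col : List String) (b : List (List String)) (r : Nat)
    (hlen : col.length = b.length) (hrow : ∀ row ∈ b, c < row.length) :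
    pvGet2 (wbC c col b) r c = col.getD r "" := by
  unfold pvGet2 wbC
  by_cases h : r < b.length
  · have hz : r < (List.zipWith (fun row v => row.set c v) b col).length := by
      rw [List.length_zipWith]; omega
    rw [List.getD_eq_getElem _ _ hz, List.getElem_zipWith, getD_set',
      if_pos ⟨rfl, hrow _ (List.getElem_mem _)⟩, List.getD_eq_getElem _ _ (by omega : r < col.length)]
  · have h1 : (List.zipWith (fun row v => row.set c v) b col).getD r [] = [] :=
      List.getD_eq_default _ _ (by rw [List.length_zipWith]; omega)
    have h2 : col.getD r "" = "" := List.getD_eq_default _ _ (by omega)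
    rw [h1, h2]
    rfl

theorem pvSet2_wbC (c : Nat) (col : List String) (b : List (List String)) (i : Nat) (v : String)
    (hlen : col.length = b.length) :
    pvSet2 (wbC c col b) i c v = wbC c (col.set i v) b := by
  unfold pvSet2 wbC
  by_cases h : i < b.length
  · have hz : i < (List.zipWith (fun row v => row.set c v) b col).length := by
      rw [List.length_zipWith]; omega
    have hgd : (List.zipWith (fun row v => row.set c v) b col).getD i []
        = b[i].set c (col.getD i "") := by
      rw [List.getD_eq_getElem _ _ hz, List.getElem_zipWith,
        List.getD_eq_getElem _ _ (by omega : i < col.length)]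
    rw [hgd, List.set_set]
    apply List.ext_getElem
    · simp
    · intro j hj1 hj2
      have hjb : j < b.length := by simp at hj2; omega
      have hjc : j < col.length := by omega
      rw [List.getElem_set, List.getElem_zipWith, List.getElem_zipWith, List.getElem_set]
      by_cases hij : i = j
      · subst hij; simp
      · simp [hij]
  · rw [List.set_eq_of_length_le (by rw [List.length_zipWith]; omega),
      List.set_eq_of_length_le (by omega : col.length ≤ i)]

theorem step1_len (st : List String × Int) (r : Nat) : ((step1 st r).1).length = st.1.length := by
  unfold step1; split_ifs <;> simp

theorem foldl_step1_len (idxs : List Nat) (st : List String × Int) :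
    ((idxs.foldl step1 st).1).length = st.1.length := by
  induction idxs generalizing st with
  | nil => rfl
  | cons r rest ih => rw [List.foldl_cons, ih, step1_len]

theorem simA (c : Nat) (b : List (List String)) (hrow : ∀ row ∈ b, c < row.length) :
    ∀ (idxs : List Nat) (col : List String) (bottom : Int), col.length = b.length →
    idxs.foldl (aStep c) (wbC c col b, bottom)
      = (wbC c ((idxs.foldl step1 (col, bottom)).1) b, (idxs.foldl step1 (col, bottom)).2) := by
  intro idxs
  induction idxs with
  | nil => intro col bottom _; rfl
  | cons r rest ih =>
    intro col bottom hlen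
    have hstep : aStep c (wbC c col b, bottom) r
        = (wbC c ((step1 (col, bottom) r).1) b, (step1 (col, bottom) r).2) := by
      unfold aStep step1
      dsimp only
      rw [pvGet2_wbC c col b r hlen hrow]
      split_ifs with h1 h2 h3
      · rfl
      · rw [pvSet2_wbC c col b _ _ hlen,
          pvSet2_wbC c _ b _ _ (by rw [List.length_set]; exact hlen)]
      · rfl
      · rfl
    rw [List.foldl_cons, hstep, List.foldl_cons,
      ih _ _ (by rw [step1_len]; exact hlen)]

theorem simW (c : Nat) (b : List (List String)) (f : Nat → String) :
    ∀ (idxs : List Nat) (col : List String), col.length = b.length →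
    idxs.foldl (fun b r => pvSet2 b r c (f r)) (wbC c col b)
      = wbC c (idxs.foldl (fun l r => l.set r (f r)) col) b := by
  intro idxs
  induction idxs with
  | nil => intro col _; rfl
  | cons r rest ih =>
    intro col hlen
    rw [List.foldl_cons, pvSet2_wbC c col b _ _ hlen, List.foldl_cons,
      ih _ (by rw [List.length_set]; exact hlen)]

theorem applySeg_zero (col : List String) (p g : Nat) : applySeg col p 0 g 0 = col := by
  unfold applySeg
  apply List.ext_getElem (by simp)
  intro i h1 h2
  rw [List.getElem_mapIdx]
  split_ifs with h3 h4 <;> first | rfl | omega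

theorem kOf_succ (col : List String) (p t : Nat) :
    kOf col p (t + 1) = kOf col p t + (if col.getD (p + t) "" = "#" then 1 else 0) := by
  unfold kOf
  rw [List.range'_concat]
  simp [List.count_append, List.count_singleton]

theorem kOf_congr : ∀ (t : Nat) (col col' : List String) (p : Nat),
    (∀ i, i < t → col'.getD (p + i) "" = col.getD (p + i) "") → kOf col' p t = kOf col p t := by
  intro t
  induction t with
  | zero => intro col col' p _; rfl
  | succ t ih =>
    intro col col' p h
    rw [kOf_succ, kOf_succ, ih col col' p (fun i hi => h i (by omega)), h t (by omega)]

theorem E0 (col : List String) (p t k : Nat) (hv : col.getD (p + t) "" = "#") :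
    applySeg col p t 0 k = applySeg col p (t + 1) 0 (k + 1) := by
  have hlt : p + t < col.length := by
    by_contra hh
    rw [List.getD_eq_default _ _ (by omega)] at hv
    exact absurd hv (by decide)
  have hvi : col[p + t] = "#" := by rwa [List.getD_eq_getElem _ _ hlt] at hv
  unfold applySeg
  apply List.ext_getElem (by simp)
  intro i h1 h2
  simp only [List.length_mapIdx] at h1
  rw [List.getElem_mapIdx, List.getElem_mapIdx]
  by_cases hi : i = p + t
  · subst hi
    split_ifs <;> first | rfl | omega | simp_all
  · split_ifs <;> first | rfl | omega | simp_all

theorem E1 (col : List String) (p t g k : Nat) (hg : g ≠ 0) (hv : col.getD (p + t) "" = "#") :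
    applySeg ((col.set (p + t + g) "#").set (p + t) ".") p t g k
      = applySeg col p (t + 1) g (k + 1) := by
  have hlt : p + t < col.length := by
    by_contra hh
    rw [List.getD_eq_default _ _ (by omega)] at hv
    exact absurd hv (by decide)
  have hvi : col[p + t] = "#" := by rwa [List.getD_eq_getElem _ _ hlt] at hv
  unfold applySeg
  apply List.ext_getElem (by simp)
  intro i h1 h2
  simp only [List.length_mapIdx, List.length_set] at h1 h2
  rw [List.getElem_mapIdx, List.getElem_mapIdx]
  simp only [List.getElem_set]
  split_ifs <;> first | rfl | omega | simp_all

theorem E2 (col : List String) (p t g k : Nat) (hv : col.getD (p + t) "" ≠ "#") :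
    applySeg col p t (g + 1) k = applySeg col p (t + 1) g k := by
  unfold applySeg
  apply List.ext_getElem (by simp)
  intro i h1 h2
  simp only [List.length_mapIdx] at h1
  rw [List.getElem_mapIdx, List.getElem_mapIdx]
  by_cases hi : i = p + t
  · subst hi
    have : col[p + t] ≠ "#" := by rwa [List.getD_eq_getElem _ _ (by omega)] at hv
    split_ifs <;> first | rfl | omega | simp_all
  · split_ifs <;> first | rfl | omega | simp_all

-- big segment invariant: processing rows p+t-1 .. p (all non-obstacle) from cursor (p+t-1)+g
theorem S1 : ∀ (t p g : Nat) (col : List String),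
    (∀ i, i < t → col.getD (p + i) "" ≠ "*") →
    ((List.range' p t).reverse).foldl step1 (col, ((p : Int) + t - 1) + g)
      = (applySeg col p t g (kOf col p t), ((p : Int) + t - 1) + g - kOf col p t) := by
  intro t
  induction t with
  | zero =>
    intro p g col _
    have h0 : kOf col p 0 = 0 := rfl
    rw [h0, applySeg_zero, show (List.range' p 0) = ([] : List Nat) from rfl]
    simp only [List.reverse_nil, List.foldl_nil]
    refine Prod.ext rfl ?_
    push_cast
    ring
  | succ t ih =>
    intro p g col h
    have hcons : ((List.range' p (t + 1)).reverse) = (p + t) :: (List.range' p t).reverse := by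
      rw [List.range'_concat, List.reverse_append]
      norm_num
    rw [hcons, List.foldl_cons]
    have hb0 : ((p : Int) + (t + 1 : Nat) - 1) + g = ((p : Int) + t) + g := by push_cast; ring
    rw [hb0]
    have hvs : col.getD (p + t) "" ≠ "*" := h t (by omega)
    by_cases hvh : col.getD (p + t) "" = "#"
    · by_cases hg : g = 0
      · subst hg
        simp only [Nat.cast_zero, add_zero]
        have hstep : step1 (col, ((p : Int) + t)) (p + t) = (col, (p : Int) + t - 1) := by
          unfold step1
          dsimp only
          rw [if_neg hvs, if_pos hvh, if_neg (by push_cast; omega)]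
        rw [hstep]
        have ih0 := ih p 0 col (fun i hi => h i (by omega))
        simp only [Nat.cast_zero, add_zero] at ih0
        rw [ih0, kOf_succ, if_pos hvh, ← E0 col p t (kOf col p t) hvh]
        refine Prod.ext rfl ?_
        push_cast
        ring
      · have htn : (((p : Int) + t) + g).toNat = p + t + g := by omega
        have hne : ((p + t : Nat) : Int) ≠ ((p : Int) + t) + g := by push_cast; omega
        have hstep : step1 (col, ((p : Int) + t) + g) (p + t)
            = ((col.set (p + t + g) "#").set (p + t) ".", ((p : Int) + t - 1) + g) := by
          unfold step1
          dsimp only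
          rw [if_neg hvs, if_pos hvh, if_pos hne, htn]
          refine Prod.ext rfl ?_
          dsimp only
          ring
        set col₁ := (col.set (p + t + g) "#").set (p + t) "." with hcol₁
        have hsame : ∀ i, i < t → col₁.getD (p + i) "" = col.getD (p + i) "" := by
          intro i hi
          rw [hcol₁, getD_set', getD_set']
          split_ifs <;> first | rfl | omega
        rw [hstep, ih p g col₁ (fun i hi => by rw [hsame i hi]; exact h i (by omega))]
        rw [kOf_congr t col col₁ p hsame]
        rw [E1 col p t g (kOf col p t) hg hvh]
        rw [kOf_succ, if_pos hvh]
        refine Prod.ext rfl ?_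
        push_cast
        ring
    · have hstep : step1 (col, ((p : Int) + t) + g) (p + t)
          = (col, ((p : Int) + t - 1) + ((g : Int) + 1)) := by
        unfold step1
        dsimp only
        rw [if_neg hvs, if_neg hvh]
        refine Prod.ext rfl ?_
        dsimp only
        ring
      rw [hstep]
      have ih1 := ih p (g + 1) col (fun i hi => h i (by omega))
      push_cast at ih1
      rw [ih1, E2 col p t g (kOf col p t) hvh, kOf_succ, if_neg hvh]
      refine Prod.ext rfl ?_
      push_cast
      ring

theorem AP (col : List String) (p t : Nat) (h : p + t ≤ col.length) :
    applySeg col p t 0 (kOf col p t)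
      = col.take p ++ bSegOut ((col.take (p + t)).drop p) ++ col.drop (p + t) := by
  have hk : kOf col p t = ((col.take (p + t)).drop p).count "#" := by
    unfold kOf
    congr 1
    apply List.ext_getElem (by simp; omega)
    intro i h1 h2
    simp only [List.length_map, List.length_range'] at h1
    rw [List.getElem_map, List.getElem_range', List.getElem_drop, List.getElem_take,
      List.getD_eq_getElem _ _ (by omega)]
    congr 1
    omega
  rw [hk]
  set seg := (col.take (p + t)).drop p with hsegdef
  set k := seg.count "#" with hkdef
  have hsl : seg.length = t := by simp [hsegdef]; omega
  have hkt : k ≤ t := by rw [hkdef, ← hsl]; exact List.count_le_length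
  have hse : ∀ (j : Nat) (hj : j < t), seg[j]'(by omega) = col[p + j]'(by omega) := by
    intro j hj
    simp [hsegdef, List.getElem_drop, List.getElem_take]
  have hbl : bSegOut seg
      = (seg.take (t - k)).map (fun x => if x = "#" then "." else x) ++ List.replicate k "#" := by
    rw [bSegOut, hsl]
  rw [hbl]
  unfold applySeg
  apply List.ext_getElem (by simp [hsl]; omega)
  intro i h1 h2
  simp only [List.length_mapIdx] at h1
  rw [List.getElem_mapIdx]
  by_cases hip : i < p
  · rw [List.getElem_append_left (by simp [hsl]; omega),
      List.getElem_append_left (by simp; omega), List.getElem_take]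
    split_ifs <;> first | rfl | omega
  · by_cases hit : i < p + t
    · rw [List.getElem_append_left (by simp [hsl]; omega),
        List.getElem_append_right (by simp; omega)]
      by_cases hw : i < p + (t - k)
      · rw [List.getElem_append_left (by simp [hsl]; omega), List.getElem_map,
          List.getElem_take]
        have h3 := hse (i - p) (by omega)
        simp only [show p + (i - p) = i from by omega] at h3
        have e2 : i - (List.take p col).length = i - p := by simp; omega
        simp only [e2, h3]
        split_ifs <;> first | rfl | omega | simp_all
      · rw [List.getElem_append_right (by simp [hsl]; omega), List.getElem_replicate]
        split_ifs <;> first | rfl | omega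
    · rw [List.getElem_append_right (by simp [hsl]; omega), List.getElem_drop]
      have e5 : p + t + (i - (List.take p col ++
          (List.map (fun x => if x = "#" then "." else x) (List.take (t - k) seg) ++
            List.replicate k "#")).length) = i := by
        simp [hsl]
        omega
      simp only [e5]
      split_ifs <;> first | rfl | omega

theorem bfold_no_star : ∀ (l : List String), "*" ∉ l →
    ∀ (S : List (List String)) (cur : List String),
    l.foldl (fun (st : List (List String) × List String) v =>
        if v = "*" then (st.1 ++ [st.2], ([] : List String)) else (st.1, st.2 ++ [v])) (S, cur)
      = (S, cur ++ l) := by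
  intro l
  induction l with
  | nil => intro _ S cur; simp
  | cons v rest ih =>
    intro h S cur
    rw [List.foldl_cons, if_neg (by simp at h; tauto)]
    rw [ih (by simp at h; tauto) S (cur ++ [v])]
    simp

theorem bSplit_single (l : List String) (h : "*" ∉ l) : bSplit l = [l] := by
  unfold bSplit
  rw [bfold_no_star l h [] []]
  simp

theorem bSplit_concat (pre seg : List String) (h : "*" ∉ seg) :
    bSplit (pre ++ "*" :: seg) = bSplit pre ++ [seg] := by
  unfold bSplit
  rw [List.foldl_append, List.foldl_cons]
  simp only [if_pos rfl]
  rw [bfold_no_star seg h]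
  simp

theorem bSplit_ne_nil (l : List String) : bSplit l ≠ [] := by
  unfold bSplit
  simp

theorem bBuild_single (seg : List String) : bBuild [seg] = bSegOut seg := by
  simp [bBuild, List.zipIdx]

theorem bBuild_concat (segs : List (List String)) (seg : List String) (h : segs ≠ []) :
    bBuild (segs ++ [seg]) = bBuild segs ++ "*" :: bSegOut seg := by
  unfold bBuild
  rw [List.zipIdx_append, List.foldl_append]
  simp only [List.zipIdx, List.foldl_cons, List.foldl_nil]
  rw [if_pos (by simpa using h)]
  simp

theorem bSegOut_length (seg : List String) : (bSegOut seg).length = seg.length := by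
  unfold bSegOut
  simp only [List.length_append, List.length_map, List.length_take, List.length_replicate]
  have := List.count_le_length (a := "#") (l := seg)
  omega

theorem take_no_star (col : List String) (p : Nat) (h : ∀ i, i < p → col.getD i "" ≠ "*") :
    "*" ∉ col.take p := by
  intro hmem
  obtain ⟨i, hi, heq⟩ := List.getElem_of_mem hmem
  simp only [List.length_take] at hi
  rw [List.getElem_take] at heq
  exact h i (by omega) (by rw [List.getD_eq_getElem _ _ (by omega), heq])

theorem Mgen : ∀ (p : Nat) (col : List String), p ≤ col.length →
    (((List.range p).reverse).foldl step1 (col, (p : Int) - 1)).1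
      = bBuild (bSplit (col.take p)) ++ col.drop p := by
  intro p
  induction p using Nat.strong_induction_on with
  | _ p ih =>
    intro col hp
    by_cases hstar : ∃ q, q < p ∧ col.getD q "" = "*"
    · obtain ⟨q0, hq0p, hq0⟩ := hstar
      set q := Nat.findGreatest (fun i => col.getD i "" = "*") (p - 1) with hq
      have hqstar : col.getD q "" = "*" :=
        Nat.findGreatest_spec (P := fun i => col.getD i "" = "*") (m := q0) (n := p - 1)
          (by omega) hq0
      have hqle : q ≤ p - 1 :=
        Nat.findGreatest_le (P := fun i => col.getD i "" = "*") (p - 1)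
      have hqp : q < p := by omega
      have hmax : ∀ i, q < i → i < p → col.getD i "" ≠ "*" := by
        intro i hqi hip
        exact Nat.findGreatest_is_greatest (P := fun i => col.getD i "" = "*") (n := p - 1)
          hqi (by omega)
      have hql : q < col.length := by
        by_contra hh
        rw [List.getD_eq_default _ _ (by omega)] at hqstar
        exact absurd hqstar (by decide)
      set t := p - 1 - q with ht
      have hqt : q + 1 + t = p := by omega
      have hrange : List.range p = List.range' 0 (q + 1) ++ List.range' (q + 1) t := by
        have h2 := List.range'_append (s := 0) (m := q + 1) (n := t) (step := 1)
        simp only [Nat.zero_add, Nat.one_mul] at h2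
        rw [List.range_eq_range', show p = q + 1 + t from by omega, ← h2]
      rw [hrange, List.reverse_append, List.foldl_append]
      have hS1 := S1 t (q + 1) 0 col (fun i hi => hmax (q + 1 + i) (by omega) (by omega))
      have hbot : (p : Int) - 1 = (((q + 1 : Nat) : Int) + (t : Nat) - 1) + ((0 : Nat) : Int) := by
        push_cast; omega
      rw [hbot, hS1]
      have hr2 : (List.range' 0 (q + 1)).reverse = q :: (List.range q).reverse := by
        rw [← List.range_eq_range', List.range_succ, List.reverse_append]
        simp
      rw [hr2, List.foldl_cons]
      set col₁ := applySeg col (q + 1) t 0 (kOf col (q + 1) t) with hcol1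
      have hgq : col₁.getD q "" = "*" := by
        rw [hcol1]
        unfold applySeg
        rw [List.getD_eq_getElem _ _ (by simpa using hql), List.getElem_mapIdx,
          if_neg (by omega), if_neg (by omega), ← List.getD_eq_getElem _ _ hql]
        exact hqstar
      have hstep : step1 (col₁, (((q + 1 : Nat) : Int) + (t : Nat) - 1) + ((0 : Nat) : Int)
            - (kOf col (q + 1) t : Nat)) q = (col₁, (q : Int) - 1) := by
        unfold step1
        dsimp only
        rw [if_pos hgq]
      rw [hstep]
      have hcol1len : q ≤ col₁.length := by
        rw [hcol1]; unfold applySeg; rw [List.length_mapIdx]; omega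
      rw [ih q hqp col₁ hcol1len]
      have hap : col₁ = col.take (q + 1) ++ bSegOut ((col.take p).drop (q + 1)) ++ col.drop p := by
        rw [hcol1]
        have := AP col (q + 1) t (by omega)
        rwa [hqt] at this
      set seg0 := (col.take p).drop (q + 1) with hseg0
      have hseg0len : seg0.length = t := by
        rw [hseg0]; simp; omega
      have hbsl : (bSegOut seg0).length = seg0.length := bSegOut_length seg0
      have htake : col₁.take q = col.take q := by
        rw [hap, List.take_append_of_le_length (by simp; omega),
          List.take_append_of_le_length (by simp; omega), List.take_take]
        congr 1
        omega
      have hstarq : (col.take (q + 1)).drop q = ["*"] := by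
        apply List.ext_getElem (by simp; omega)
        intro i h1 h2
        simp only [List.length_drop, List.length_take] at h1
        rw [List.getElem_drop, List.getElem_take]
        have hi0 : i = 0 := by simp at h2; omega
        subst hi0
        have hcq : col[q]'hql = "*" := by
          have h5 := hqstar
          rwa [List.getD_eq_getElem _ _ hql] at h5
        simp only [Nat.add_zero]
        rw [hcq]
        rfl
      have hdrop : col₁.drop q = "*" :: (bSegOut seg0 ++ col.drop p) := by
        rw [hap, List.drop_append_of_le_length (by simp; omega),
          List.drop_append_of_le_length (by simp; omega), hstarq]
        simp
      have hsegnostar : "*" ∉ seg0 := by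
        intro hmem
        rw [hseg0] at hmem
        obtain ⟨i, hi, heq⟩ := List.getElem_of_mem hmem
        simp only [List.length_drop, List.length_take] at hi
        rw [List.getElem_drop, List.getElem_take] at heq
        exact hmax (q + 1 + i) (by omega) (by omega)
          (by rw [List.getD_eq_getElem _ _ (by omega), heq])
      have h3 : col.take (q + 1) = col.take q ++ ["*"] := by
        have h3' := (List.take_append_drop q (col.take (q + 1))).symm
        rw [hstarq, List.take_take, show min q (q + 1) = q from by omega] at h3'
        exact h3'
      have hsplit : col.take p = col.take q ++ "*" :: seg0 := by
        have h1 := (List.take_append_drop (q + 1) (col.take p)).symm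
        have h2 : (col.take p).take (q + 1) = col.take (q + 1) := by
          rw [List.take_take]
          congr 1
          omega
        rw [h2, ← hseg0, h3] at h1
        rw [h1]
        simp
      rw [htake, hdrop, hsplit, bSplit_concat (col.take q) seg0 hsegnostar,
        bBuild_concat _ _ (bSplit_ne_nil _)]
      simp [List.append_assoc]
    · push_neg at hstar
      have hS1 := S1 p 0 0 col (fun i hi => by
        have := hstar i hi
        simpa using this)
      have hbot : (p : Int) - 1 = (((0 : Nat) : Int) + (p : Nat) - 1) + ((0 : Nat) : Int) := by
        push_cast; ring
      rw [List.range_eq_range', hbot, hS1]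
      show applySeg col 0 p 0 (kOf col 0 p) = _
      have hap := AP col 0 p (by omega)
      simp only [Nat.zero_add, List.drop_zero, List.take_zero, List.nil_append] at hap
      rw [hap, bSplit_single (col.take p) (take_no_star col p hstar), bBuild_single]

theorem LEN (col : List String) : (bBuild (bSplit col)).length = col.length := by
  have h := Mgen col.length col le_rfl
  have h2 : ((((List.range col.length).reverse).foldl step1
      (col, (col.length : Int) - 1)).1).length = col.length := foldl_step1_len _ _
  rw [h] at h2
  simpa using h2

theorem FW : ∀ (n : Nat) (col out : List String), n ≤ col.length → n ≤ out.length →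
    (List.range n).foldl (fun l r => l.set r (out.getD r "")) col = out.take n ++ col.drop n := by
  intro n
  induction n with
  | zero => intro col out _ _; simp
  | succ n ih =>
    intro col out h1 h2
    rw [List.range_succ, List.foldl_append, ih col out (by omega) (by omega)]
    simp only [List.foldl_cons, List.foldl_nil]
    apply List.ext_getElem (by simp; omega)
    intro i hi1 hi2
    rw [List.getElem_set]
    by_cases hin : n = i
    · subst hin
      rw [if_pos rfl, List.getElem_append_left (by simp; omega), List.getElem_take,
        List.getD_eq_getElem _ _ (by omega)]
    · rw [if_neg hin]
      by_cases hlt : i < n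
      · rw [List.getElem_append_left (by simp; omega),
          List.getElem_append_left (by simp; omega), List.getElem_take, List.getElem_take]
      · rw [List.getElem_append_right (by simp; omega),
          List.getElem_append_right (by simp; omega), List.getElem_drop, List.getElem_drop]
        simp only [List.length_take]
        have e1 : min n out.length = n := by omega
        have e2 : min (n + 1) out.length = n + 1 := by omega
        simp only [e1, e2]
        have e3 : n + (i - n) = i := by omega
        have e4 : n + 1 + (i - (n + 1)) = i := by omega
        simp only [e3, e4]

theorem colbuild (c : Nat) (b : List (List String)) :
    (List.range b.length).map (fun r => pvGet2 b r c) = colOf c b := by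
  unfold colOf
  apply List.ext_getElem (by simp)
  intro i h1 h2
  simp only [List.getElem_map, List.getElem_range]
  unfold pvGet2
  rw [show b.getD i [] = b[i]'(by simpa using h2) from
    List.getD_eq_getElem _ _ (by simpa using h2)]

theorem percol (c : Nat) (b : List (List String)) (hrow : ∀ row ∈ b, c < row.length) :
    (((List.range b.length).reverse).foldl (aStep c) (b, (b.length : Int) - 1)).1
      = bCol b.length c b := by
  have hlen : (colOf c b).length = b.length := by simp [colOf]
  -- A side
  have hsim := simA c b hrow ((List.range b.length).reverse) (colOf c b)
    ((b.length : Int) - 1) hlen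
  rw [wbC_self] at hsim
  rw [hsim]
  have htk : (colOf c b).take b.length = colOf c b := by
    rw [← hlen]; exact List.take_length
  have hdp : (colOf c b).drop b.length = [] := by
    rw [← hlen]; exact List.drop_length
  have hX : (((List.range b.length).reverse).foldl step1 (colOf c b, (b.length : Int) - 1)).1
      = bBuild (bSplit (colOf c b)) := by
    rw [Mgen b.length (colOf c b) (by omega), htk, hdp, List.append_nil]
  -- B side
  have hout : (bBuild (bSplit (colOf c b))).length = b.length := by rw [LEN, hlen]
  have hsw := simW c b (fun r => (bBuild (bSplit (colOf c b))).getD r "")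
    (List.range b.length) (colOf c b) hlen
  rw [wbC_self] at hsw
  have hfw := FW b.length (colOf c b) (bBuild (bSplit (colOf c b))) (by omega) (by omega)
  have htk2 : (bBuild (bSplit (colOf c b))).take b.length = bBuild (bSplit (colOf c b)) := by
    rw [← hout]; exact List.take_length
  rw [hfw, htk2, hdp, List.append_nil] at hsw
  show wbC c _ b = bCol b.length c b
  rw [hX]
  unfold bCol
  rw [colbuild, ← hsw]

theorem getD_set2 {α : Type} (l : List α) (i j : Nat) (v d : α) :
    (l.set i v).getD j d = if i = j ∧ i < l.length then v else l.getD j d := by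
  simp [List.getD_eq_getElem?_getD, List.getElem?_set]
  split_ifs with h1 h2 h3 h4 <;> simp_all <;> omega

theorem pvSet2_shape (b : List (List String)) (r c : Nat) (v : String) :
    (pvSet2 b r c v).length = b.length ∧
      ∀ i, ((pvSet2 b r c v).getD i []).length = (b.getD i []).length := by
  constructor
  · simp [pvSet2]
  · intro i
    unfold pvSet2
    rw [getD_set2]
    split_ifs with h
    · obtain ⟨h1, h2⟩ := h
      subst h1
      simp
    · rfl

theorem foldl_shape (c : Nat) (g : Nat → String) : ∀ (idxs : List Nat) (b : List (List String)),
    ((idxs.foldl (fun b r => pvSet2 b r c (g r)) b).length = b.length ∧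
      ∀ i, ((idxs.foldl (fun b r => pvSet2 b r c (g r)) b).getD i []).length
        = (b.getD i []).length) := by
  intro idxs
  induction idxs with
  | nil => intro b; exact ⟨rfl, fun _ => rfl⟩
  | cons r rest ih =>
    intro b
    rw [List.foldl_cons]
    obtain ⟨hl, hr⟩ := ih (pvSet2 b r c (g r))
    obtain ⟨hl2, hr2⟩ := pvSet2_shape b r c (g r)
    exact ⟨hl.trans hl2, fun i => (hr i).trans (hr2 i)⟩

theorem bCol_shape (rows c : Nat) (b : List (List String)) :
    (bCol rows c b).length = b.length ∧
      ∀ i, ((bCol rows c b).getD i []).length = (b.getD i []).length := by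
  unfold bCol
  exact foldl_shape c _ (List.range rows) b

theorem TOP (cs : List Nat) : ∀ (ROW : Nat) (b : List (List String)), ROW = b.length →
    (∀ row ∈ b, ∀ c ∈ cs, c < row.length) →
    cs.foldl (fun b c => (((List.range ROW).reverse).foldl (aStep c) (b, (ROW : Int) - 1)).1) b
      = cs.foldl (fun b c => bCol ROW c b) b := by
  induction cs with
  | nil => intro ROW b _ _; rfl
  | cons c cs ih =>
    intro ROW b hR hrow
    rw [List.foldl_cons, List.foldl_cons]
    have hrow1 : ∀ row ∈ b, c < row.length := fun row hr => hrow row hr c (by simp)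
    have hpc : (((List.range ROW).reverse).foldl (aStep c) (b, (ROW : Int) - 1)).1
        = bCol ROW c b := by
      subst hR
      exact percol c b hrow1
    rw [hpc]
    apply ih ROW (bCol ROW c b)
    · rw [(bCol_shape ROW c b).1, hR]
    · intro row hrme c' hc'
      obtain ⟨i, hi, heq⟩ := List.getElem_of_mem hrme
      have h2 := (bCol_shape ROW c b).2 i
      have hib : i < b.length := by rw [← (bCol_shape ROW c b).1]; exact hi
      rw [List.getD_eq_getElem _ _ hi, heq, List.getD_eq_getElem _ _ hib] at h2
      rw [h2]
      exact hrow b[i] (List.getElem_mem _) c' (List.mem_cons_of_mem c hc')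

-- ===== VERDICT (by name: the statement is the Claim_ definition above) =====
theorem emulateGravitation_spec : Claim_equal_emulateGravitation := by
  intro box _ hpre
  unfold Spec_emulateGravitation emulateGravitation emulateGravitation_alt
  simp only []
  refine TOP (List.range box.headI.length) box.length box rfl ?_
  intro row hrow c hc
  exact lt_of_lt_of_le (List.mem_range.mp hc) (hpre.2 row hrow)
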